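-- pv_equiv track=rewrite | github.com/aerothai-sese/aero_go_green | utils.py | get_toc_df
-- ===== SOURCE A (Python) =====
-- def get_toc_df(lst, lower_th, higher_th):
--     current_count = 0
--     last_zero_index = None  # Track the last valid zero index
--
--     for i, num in enumerate(lst):
--         if num == 0:
--             current_count += 1
--         else:
--             # If the count of consecutive zeros is within the threshold range
--             if lower_th < current_count < higher_th:
--                 last_zero_index = i - 1  # Update the latest valid sequence index
--             current_count = 0  # Reset the count for the next sequence
--
--     # Check the last sequence of zeros at the end of the list
--     if lower_th < current_count < higher_th:
--         last_zero_index = len(lst) - 1  # If valid, set the last index of the sequence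
--
--     return last_zero_index  # Return the latest valid zero index or None
-- ===== SOURCE B (Python) =====
-- def get_toc_df(lst, lower_th, higher_th):
--     # Scan from the right: at each run boundary (end of list or a nonzero
--     # element at index i), measure the zero run ending at i-1; the first
--     # boundary whose run length lies strictly between the thresholds gives
--     # the answer, so we can return immediately.
--     i = len(lst)
--     while i >= 0:
--         j = i - 1
--         while j >= 0 and lst[j] == 0:
--             j -= 1
--         if lower_th < (i - 1 - j) < higher_th:
--             return i - 1
--         i = j
--     return None
-- ===== Notes on version B (the rewrite author's own statement) =====
-- stated objective: alternative
-- what changed: Replaces A's forward enumerate-and-overwrite scan (counter plus last-valid-index accumulator and a trailing end-of-list check) with a right-to-left run-boundary scan that measures each zero run once and returns immediately at the first (i.e. last) valid run end.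
import Mathlib
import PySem

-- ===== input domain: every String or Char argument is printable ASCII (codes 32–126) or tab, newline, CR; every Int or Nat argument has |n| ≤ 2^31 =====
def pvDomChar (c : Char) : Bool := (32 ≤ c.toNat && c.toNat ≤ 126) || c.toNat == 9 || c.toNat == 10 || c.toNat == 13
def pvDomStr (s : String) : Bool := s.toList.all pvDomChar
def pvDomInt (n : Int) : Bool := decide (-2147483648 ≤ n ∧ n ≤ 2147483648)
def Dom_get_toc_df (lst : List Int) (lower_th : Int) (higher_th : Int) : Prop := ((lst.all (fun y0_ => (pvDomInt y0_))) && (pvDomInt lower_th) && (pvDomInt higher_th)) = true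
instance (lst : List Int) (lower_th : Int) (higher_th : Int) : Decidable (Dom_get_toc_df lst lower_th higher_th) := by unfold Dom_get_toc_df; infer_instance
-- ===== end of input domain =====

-- B scans the list right-to-left over zero-run boundaries and returns at the
-- first (i.e. last) valid run end, instead of A's forward scan with an
-- overwritten accumulator; same cost, different decomposition.

-- ===== PORT A =====
-- forward pass: state = (current_count, last_zero_index); then the end-of-list check
def get_toc_df (lst : List Int) (lower_th : Int) (higher_th : Int) : Option Int :=
  let st := (PySem.List.enumerate lst).foldl
    (fun (s : Int × Option Int) p =>
      if p.2 = 0 then (s.1 + 1, s.2)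
      else (0, if lower_th < s.1 ∧ s.1 < higher_th then some (p.1 - 1) else s.2))
    (0, none)
  if lower_th < st.1 ∧ st.1 < higher_th then some ((lst.length : Int) - 1) else st.2

-- ===== PORT B =====
-- inner while loop of Source B: length of the maximal zero run ending at index i-1
def zrun (lst : List Int) : Nat → Nat
  | 0 => 0
  | Nat.succ j => if lst.getD j 1 = 0 then zrun lst j + 1 else 0

-- outer while loop of Source B: i is len(lst) or the index of a nonzero element;
-- after an invalid run of length r the loop jumps to j = i - r - 1 (none when j < 0)
def bloop (lst : List Int) (lower_th : Int) (higher_th : Int) : Nat → Option Int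
  | i =>
    let r := zrun lst i
    if lower_th < (r : Int) ∧ (r : Int) < higher_th then some ((i : Int) - 1)
    else if _h : r < i then bloop lst lower_th higher_th (i - r - 1) else none
  decreasing_by omega

def get_toc_df_alt (lst : List Int) (lower_th : Int) (higher_th : Int) : Option Int :=
  bloop lst lower_th higher_th lst.length

-- ===== PRECONDITION & SPEC =====
def Spec_get_toc_df (lst : List Int) (lower_th : Int) (higher_th : Int) (out : Option Int) : Prop := out = get_toc_df_alt lst lower_th higher_th
instance (lst : List Int) (lower_th : Int) (higher_th : Int) (out : Option Int) : Decidable (Spec_get_toc_df lst lower_th higher_th out) := by unfold Spec_get_toc_df; infer_instance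

-- ===== CLAIM (what is proved, stated in full; the proofs are below) =====
def Claim_equal_get_toc_df : Prop := ∀ (lst : List Int) (lower_th : Int) (higher_th : Int), Dom_get_toc_df lst lower_th higher_th → Spec_get_toc_df lst lower_th higher_th (get_toc_df lst lower_th higher_th)

-- ===== LEMMAS AND PROOFS =====

-- A's fold step, named for the lemmas
def stepA (lower_th higher_th : Int) (s : Int × Option Int) (p : Int × Int) : Int × Option Int :=
  if p.2 = 0 then (s.1 + 1, s.2)
  else (0, if lower_th < s.1 ∧ s.1 < higher_th then some (p.1 - 1) else s.2)

theorem get_toc_df_eq (lst : List Int) (lo hi : Int) :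
    get_toc_df lst lo hi =
      (let st := (PySem.List.enumerate lst).foldl (stepA lo hi) (0, none)
       if lo < st.1 ∧ st.1 < hi then some ((lst.length : Int) - 1) else st.2) := rfl

theorem zrun_succ (l : List Int) (j : Nat) :
    zrun l (j + 1) = if l.getD j 1 = 0 then zrun l j + 1 else 0 := rfl

theorem getD_append_left (l s : List Int) (k : Nat) (hk : k < l.length) :
    (l ++ s).getD k 1 = l.getD k 1 := by
  rw [List.getD, List.getD, List.getElem?_append_left hk]

theorem getD_replicate (n k : Nat) (hk : k < n) :
    (List.replicate n (0 : Int)).getD k 1 = 0 := by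
  rw [List.getD, List.getElem?_replicate]
  simp [hk]

-- zrun only reads entries below its index
theorem zrun_congr : ∀ (i : Nat) (l l' : List Int),
    (∀ k, k < i → l.getD k 1 = l'.getD k 1) → zrun l i = zrun l' i := by
  intro i
  induction i with
  | zero => intro _ _ _; rfl
  | succ j ih =>
    intro l l' h
    rw [zrun_succ, zrun_succ, h j (Nat.lt_succ_self j),
        ih l l' (fun k hk => h k (Nat.lt_succ_of_lt hk))]

theorem zrun_le : ∀ (l : List Int) (i : Nat), zrun l i ≤ i := by
  intro l i
  induction i with
  | zero => exact Nat.le_refl 0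
  | succ j ih => rw [zrun_succ]; split <;> omega

theorem zrun_replicate : ∀ (n : Nat), zrun (List.replicate n 0) n = n := by
  intro n
  induction n with
  | zero => rfl
  | succ m ih =>
    rw [zrun_succ, if_pos (getD_replicate (m+1) m (Nat.lt_succ_self m))]
    rw [zrun_congr m (List.replicate (m+1) (0:Int)) (List.replicate m 0)
      (fun k hk => by
        rw [getD_replicate (m+1) k (Nat.lt_succ_of_lt hk), getD_replicate m k hk]), ih]

theorem zrun_run (l : List Int) (x : Int) (hx : x ≠ 0) : ∀ (r : Nat),
    zrun ((l ++ [x]) ++ List.replicate r 0) ((l ++ [x]).length + r) = r := by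
  intro r
  induction r with
  | zero =>
    rw [List.replicate_zero, List.append_nil, Nat.add_zero,
        show (l ++ [x]).length = l.length + 1 by simp, zrun_succ]
    have hg : (l ++ [x]).getD l.length 1 = x := by
      rw [List.getD, List.getElem?_append_right (Nat.le_refl _)]
      simp
    rw [hg, if_neg hx]
  | succ m ih =>
    rw [show (l ++ [x]).length + (m + 1) = ((l ++ [x]).length + m) + 1 from rfl, zrun_succ]
    have hg : ((l ++ [x]) ++ List.replicate (m+1) (0:Int)).getD ((l ++ [x]).length + m) 1 = 0 := by
      rw [List.getD, List.getElem?_append_right (by omega)]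
      simp
    rw [hg, if_pos rfl]
    rw [zrun_congr ((l ++ [x]).length + m) ((l ++ [x]) ++ List.replicate (m+1) (0:Int))
        ((l ++ [x]) ++ List.replicate m 0)
        (fun k hk => by
          by_cases hkl : k < (l ++ [x]).length
          · rw [getD_append_left _ _ _ hkl, getD_append_left _ _ _ hkl]
          · rw [List.getD, List.getD, List.getElem?_append_right (by omega),
                List.getElem?_append_right (by omega)]
            rw [List.getElem?_replicate, List.getElem?_replicate,
                if_pos (show k - (l ++ [x]).length < m + 1 by omega),
                if_pos (show k - (l ++ [x]).length < m by omega)]), ih]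

-- bloop at a position inside a prefix ignores the suffix
theorem bloop_prefix (lo hi : Int) (l s : List Int) : ∀ (i : Nat), i ≤ l.length →
    bloop (l ++ s) lo hi i = bloop l lo hi i := by
  intro i
  induction i using Nat.strong_induction_on with
  | _ i ih =>
    intro hi_le
    rw [bloop]
    conv_rhs => rw [bloop]
    have hz : zrun (l ++ s) i = zrun l i :=
      zrun_congr i _ _ (fun k hk => getD_append_left l s k (by omega))
    rw [hz]
    split
    · rfl
    · split
      · exact ih _ (by have := zrun_le l i; omega) (by have := zrun_le l i; omega)
      · rfl

-- the fold over a block of zeros just adds to the counter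
theorem foldA_zeros (lo hi : Int) : ∀ (m : Nat) (st : Int × Option Int) (s0 : Int),
    (PySem.List.enumerate (List.replicate m (0:Int)) s0).foldl (stepA lo hi) st
      = (st.1 + m, st.2) := by
  intro m
  induction m with
  | zero => intro st s0; simp [PySem.List.enumerate_nil]
  | succ k ihm =>
    intro st s0
    rw [List.replicate_succ, PySem.List.enumerate_cons]
    simp only [List.foldl_cons]
    rw [show stepA lo hi st (s0, 0) = (st.1 + 1, st.2) from rfl, ihm]
    simp only [Prod.mk.injEq]
    exact ⟨by push_cast; ring, trivial⟩

-- A on pre ++ [x] ++ zeros: the trailing run if valid, else A on pre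
theorem A_step (pre : List Int) (x : Int) (r : Nat) (lo hi : Int) (hx : x ≠ 0) :
    get_toc_df ((pre ++ [x]) ++ List.replicate r 0) lo hi =
      (if lo < (r : Int) ∧ (r : Int) < hi
       then some ((((pre ++ [x]) ++ List.replicate r 0).length : Int) - 1)
       else get_toc_df pre lo hi) := by
  rw [get_toc_df_eq, get_toc_df_eq]
  simp only [PySem.List.enumerate_append, List.foldl_append]
  rw [PySem.List.enumerate_cons, PySem.List.enumerate_nil]
  simp only [List.foldl_cons, List.foldl_nil]
  set st := (PySem.List.enumerate pre 0).foldl (stepA lo hi) ((0:Int), (none : Option Int)) with hst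
  have hxstep : stepA lo hi st ((0:Int) + (pre.length : Int), x) =
      (0, if lo < st.1 ∧ st.1 < hi then some ((0:Int) + (pre.length : Int) - 1) else st.2) := by
    simp [stepA, hx]
  rw [hxstep, foldA_zeros]
  by_cases hr : lo < (r : Int) ∧ (r : Int) < hi
  · simp [hr]
  · by_cases hs : lo < st.1 ∧ st.1 < hi
    · simp [hr, hs]
    · simp [hr, hs]

-- B on pre ++ [x] ++ zeros: the trailing run if valid, else B on pre
theorem B_step (pre : List Int) (x : Int) (r : Nat) (lo hi : Int) (hx : x ≠ 0) :
    get_toc_df_alt ((pre ++ [x]) ++ List.replicate r 0) lo hi =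
      (if lo < (r : Int) ∧ (r : Int) < hi
       then some ((((pre ++ [x]) ++ List.replicate r 0).length : Int) - 1)
       else get_toc_df_alt pre lo hi) := by
  unfold get_toc_df_alt
  have hlen : ((pre ++ [x]) ++ List.replicate r 0).length = (pre ++ [x]).length + r := by
    simp only [List.length_append, List.length_replicate]
  rw [hlen, bloop]
  rw [zrun_run pre x hx r]
  split
  · rfl
  · have hpl : (pre ++ [x]).length = pre.length + 1 := by simp
    rw [dif_pos (by omega)]
    rw [show (pre ++ [x]).length + r - r - 1 = pre.length by omega]
    rw [List.append_assoc]
    exact bloop_prefix lo hi pre ([x] ++ List.replicate r 0) pre.length (Nat.le_refl _)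

theorem A_zeros (n : Nat) (lo hi : Int) :
    get_toc_df (List.replicate n 0) lo hi =
      (if lo < (n : Int) ∧ (n : Int) < hi then some ((n : Int) - 1) else none) := by
  rw [get_toc_df_eq]
  rw [show ((0:Int), (none : Option Int)) = ((0:Int), (none : Option Int)) from rfl]
  have := foldA_zeros lo hi n ((0:Int), (none : Option Int)) 0
  simp only [this]
  simp

theorem B_zeros (n : Nat) (lo hi : Int) :
    get_toc_df_alt (List.replicate n 0) lo hi =
      (if lo < (n : Int) ∧ (n : Int) < hi then some ((n : Int) - 1) else none) := by
  unfold get_toc_df_alt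
  rw [List.length_replicate, bloop, zrun_replicate]
  split
  · rfl
  · rw [dif_neg (by omega)]

-- every list is all zeros, or a prefix, a nonzero element, then trailing zeros
theorem decomp (l : List Int) :
    (∃ n, l = List.replicate n 0) ∨
    (∃ pre x r, x ≠ 0 ∧ l = (pre ++ [x]) ++ List.replicate r 0) := by
  induction l using List.reverseRecOn with
  | nil => exact Or.inl ⟨0, rfl⟩
  | append_singleton t a ih =>
    by_cases ha : a = 0
    · subst ha
      rcases ih with ⟨n, rfl⟩ | ⟨pre, x, r, hx, rfl⟩
      · exact Or.inl ⟨n + 1, by rw [List.replicate_succ']⟩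
      · refine Or.inr ⟨pre, x, r + 1, hx, ?_⟩
        rw [List.replicate_succ', ← List.append_assoc]
    · exact Or.inr ⟨t, a, 0, ha, by simp⟩

theorem main_eq : ∀ (lst : List Int) (lower_th higher_th : Int),
    get_toc_df lst lower_th higher_th = get_toc_df_alt lst lower_th higher_th := by
  have H : ∀ (N : Nat) (lst : List Int), lst.length ≤ N → ∀ (lo hi : Int),
      get_toc_df lst lo hi = get_toc_df_alt lst lo hi := by
    intro N
    induction N with
    | zero =>
      intro lst hlen lo hi
      have hnil : lst = [] := List.eq_nil_of_length_eq_zero (Nat.le_zero.mp hlen)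
      subst hnil
      rw [show ([] : List Int) = List.replicate 0 0 from rfl, A_zeros, B_zeros]
    | succ N ih =>
      intro lst hlen lo hi
      rcases decomp lst with ⟨n, rfl⟩ | ⟨pre, x, r, hx, rfl⟩
      · rw [A_zeros, B_zeros]
      · rw [A_step pre x r lo hi hx, B_step pre x r lo hi hx]
        split
        · rfl
        · exact ih pre (by simp only [List.length_append, List.length_replicate,
            List.length_cons, List.length_nil] at hlen ⊢; omega) lo hi
  exact fun lst lo hi => H lst.length lst (Nat.le_refl _) lo hi

-- ===== VERDICT (by name: the statement is the Claim_ definition above) =====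
theorem get_toc_df_spec : Claim_equal_get_toc_df := by
  intro lst lo hi _
  unfold Spec_get_toc_df
  exact main_eq lst lo hi
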